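-- pv_equiv track=rewrite | github.com/maxcubcru88/Bimming | Bimming.tab/Filters.Panel/Rename Filters.pushbutton/script.py | duplicate_tracker
-- ===== SOURCE A (Python) =====
-- def duplicate_tracker(lst):
--     """
--     Assigns a group name prefixed with 'DUPLICATED' to words that appear more than once in the list.
--     Words that appear only once are labeled as 'NOT DUPLICATED'.
--     """
--     # Count occurrences of each word
--     counts = {}
--     for word in lst:
--         counts[word] = counts.get(word, 0) + 1
--
--     # Initialize variables
--     group_mapping = {}
--     group_counter = {}
--     output = []
--
--     for word in lst:
--         if counts[word] > 1:  # If the word repeats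
--             if word not in group_mapping:
--                 # Assign a base label like "DUPLICATED 1", "DUPLICATED 2"
--                 group_mapping[word] = "DUPLICATED " + str(len(group_mapping) + 1)
--                 group_counter[word] = 0
--
--             group_counter[word] += 1
--             if group_counter[word] == 1:
--                 output.append(group_mapping[word])
--             else:
--                 output.append("{} ({})".format(group_mapping[word], group_counter[word] - 1))
--         else:  # If the word is unique
--             output.append("NOT DUPLICATED")
--
--     return output
-- ===== SOURCE B (Python) =====
-- def duplicate_tracker(lst):
--     """
--     Assigns a group name prefixed with 'DUPLICATED' to words that appear more than once in the list.
--     Words that appear only once are labeled as 'NOT DUPLICATED'.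
--     """
--     # Group numbers come from the first-appearance order of the duplicated words.
--     dups = [w for w in dict.fromkeys(lst) if lst.count(w) > 1]
--     group = {w: i for i, w in enumerate(dups, 1)}
--
--     def label(i, w):
--         if w not in group:
--             return "NOT DUPLICATED"
--         prior = lst[:i].count(w)
--         if prior == 0:
--             return "DUPLICATED {}".format(group[w])
--         return "DUPLICATED {} ({})".format(group[w], prior)
--
--     return [label(i, w) for i, w in enumerate(lst)]
-- ===== Notes on version B (the rewrite author's own statement) =====
-- stated objective: alternative
-- what changed: A threads three mutable dicts (counts, group_mapping, group_counter) through one stateful loop; B precomputes the group-number table from the deduplicated duplicated words and emits each label by a per-position closed form (prior occurrences = count in lst[:i]).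
import Mathlib
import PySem

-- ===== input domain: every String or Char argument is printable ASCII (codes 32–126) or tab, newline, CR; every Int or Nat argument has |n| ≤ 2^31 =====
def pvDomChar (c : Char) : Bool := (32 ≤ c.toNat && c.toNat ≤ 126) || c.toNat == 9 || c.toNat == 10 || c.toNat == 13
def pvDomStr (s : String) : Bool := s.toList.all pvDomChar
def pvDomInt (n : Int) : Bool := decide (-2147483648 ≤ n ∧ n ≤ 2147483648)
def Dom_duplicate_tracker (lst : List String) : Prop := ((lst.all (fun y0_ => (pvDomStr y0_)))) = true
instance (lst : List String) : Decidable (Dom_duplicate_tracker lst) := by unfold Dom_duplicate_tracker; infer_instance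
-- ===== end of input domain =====

-- B replaces A's three stateful dictionaries by a precomputed group table over the deduplicated
-- duplicated words plus a per-position closed-form label (prior occurrences counted in lst[:i]);
-- objective: alternative (stateless, comprehension-based decomposition; not claimed faster).

-- ===== PORT A =====
-- counts = {}; for word in lst: counts[word] = counts.get(word, 0) + 1
def countsOf (lst : List String) : PySem.Dict String Int :=
  lst.foldl (fun d word => d.insert word (d.getD word 0 + 1)) PySem.Dict.empty

-- the body of A's second loop (state = (group_mapping, group_counter, output))
def aStep (counts : PySem.Dict String Int)
    (s : PySem.Dict String String × PySem.Dict String Int × List String) (word : String) :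
    PySem.Dict String String × PySem.Dict String Int × List String :=
  if 1 < counts.getD word 0 then
    let gm := if s.1.contains word then s.1
              else s.1.insert word ("DUPLICATED " ++ PySem.Int.toStr ((s.1.size : Int) + 1))
    let gc := if s.1.contains word then s.2.1 else s.2.1.insert word 0
    let gc2 := gc.insert word (gc.getD word 0 + 1)
    if gc2.getD word 0 = 1 then (gm, gc2, s.2.2 ++ [gm.getD word ""])
    else (gm, gc2, s.2.2 ++ [gm.getD word "" ++ " (" ++ PySem.Int.toStr (gc2.getD word 0 - 1) ++ ")"])
  else (s.1, s.2.1, s.2.2 ++ ["NOT DUPLICATED"])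

def duplicate_tracker (lst : List String) : List String :=
  (lst.foldl (aStep (countsOf lst)) (PySem.Dict.empty, PySem.Dict.empty, [])).2.2

-- ===== PORT B =====
-- dups = [w for w in dict.fromkeys(lst) if lst.count(w) > 1]
def bDups (lst : List String) : List String :=
  (PySem.List.dedup lst).filter (fun w => decide (1 < PySem.List.count lst w))

-- group = {w: i for i, w in enumerate(dups, 1)}
def bGroup (lst : List String) : PySem.Dict String Int :=
  PySem.Dict.ofList ((PySem.List.enumerate (bDups lst) 1).map (fun p => (p.2, p.1)))

-- def label(i, w): …
def bLabel (lst : List String) (group : PySem.Dict String Int) (i : Int) (w : String) : String :=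
  if group.contains w = false then "NOT DUPLICATED"
  else
    let prior : Nat := PySem.List.count (PySem.List.slice lst none (some i)) w
    if prior = 0 then "DUPLICATED " ++ PySem.Int.toStr (group.getD w 0)
    else "DUPLICATED " ++ PySem.Int.toStr (group.getD w 0) ++ " (" ++ PySem.Int.toStr (prior : Int) ++ ")"

def duplicate_tracker_alt (lst : List String) : List String :=
  (PySem.List.enumerate lst 0).map (fun p => bLabel lst (bGroup lst) p.1 p.2)

-- ===== PRECONDITION & SPEC =====
def Spec_duplicate_tracker (lst : List String) (out : List String) : Prop := out = duplicate_tracker_alt lst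
instance (lst : List String) (out : List String) : Decidable (Spec_duplicate_tracker lst out) := by unfold Spec_duplicate_tracker; infer_instance

-- ===== CLAIM (what is proved, stated in full; the proofs are below) =====
def Claim_equal_duplicate_tracker : Prop := ∀ (lst : List String), Dom_duplicate_tracker lst → Spec_duplicate_tracker lst (duplicate_tracker lst)

-- ===== LEMMAS AND PROOFS =====

-- the duplicated words of the prefix p, in first-appearance order (A's group_mapping keys)
def pvDD (lst p : List String) : List String :=
  (PySem.List.dedup p).filter (fun w => decide (1 < PySem.List.count lst w))

-- A's group_mapping after processing prefix p
def pvGM (lst p : List String) : PySem.Dict String String :=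
  PySem.Dict.mk ((pvDD lst p).map (fun v => (v, "DUPLICATED " ++ PySem.Int.toStr ((bGroup lst).getD v 0))))

-- A's group_counter after processing prefix p
def pvGC (lst p : List String) : PySem.Dict String Int :=
  PySem.Dict.mk ((pvDD lst p).map (fun v => (v, (PySem.List.count p v : Int))))

-- A's output after processing prefix p, written with B's label function
def pvOut (lst p : List String) : List String :=
  (PySem.List.enumerate p 0).map (fun q => bLabel lst (bGroup lst) q.1 q.2)

lemma countsOf_getD (lst : List String) (w : String) :
    (countsOf lst).getD w 0 = (lst.count w : Int) := by
  simp [countsOf, PySem.Dict.getD_foldl_insert_add_one]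

lemma prefix_foldl_add (t : List String) (s : PySem.Set String) :
    s <+: t.foldl PySem.Set.add s := by
  induction t generalizing s with
  | nil => exact List.prefix_rfl
  | cons x rest ih =>
      refine List.IsPrefix.trans ?_ (ih (PySem.Set.add s x))
      unfold PySem.Set.add
      split
      · exact List.prefix_rfl
      · exact List.prefix_append s [x]

lemma dedup_prefix {p q : List String} (h : p <+: q) :
    PySem.List.dedup p <+: PySem.List.dedup q := by
  obtain ⟨t, rfl⟩ := h
  simp only [PySem.List.dedup, PySem.Set.ofList_eq_foldl, List.foldl_append]
  exact prefix_foldl_add t _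

lemma dedup_append_singleton (p : List String) (w : String) :
    PySem.List.dedup (p ++ [w]) =
      if w ∈ PySem.List.dedup p then PySem.List.dedup p else PySem.List.dedup p ++ [w] := by
  simp only [PySem.List.dedup, PySem.Set.ofList_eq_foldl, List.foldl_append, List.foldl_cons,
    List.foldl_nil]
  unfold PySem.Set.add PySem.Set.contains
  simp

lemma nodup_pvDD (lst p : List String) : (pvDD lst p).Nodup :=
  (PySem.List.nodup_dedup p).filter _

lemma pvDD_prefix (lst : List String) {p : List String} (h : p <+: lst) :
    pvDD lst p <+: bDups lst :=
  List.IsPrefix.filter _ (dedup_prefix h)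

lemma bDups_nodup (lst : List String) : (bDups lst).Nodup :=
  nodup_pvDD lst lst

lemma bGroup_items (lst : List String) :
    (bGroup lst).items = (PySem.List.enumerate (bDups lst) 1).map (fun p => (p.2, p.1)) := by
  have hn : (((PySem.List.enumerate (bDups lst) 1).map (fun p => (p.2, p.1))).map Prod.fst).Nodup := by
    simp only [List.map_map]
    have : (Prod.fst ∘ fun p : Int × String => (p.2, p.1)) = Prod.snd := rfl
    rw [this, PySem.List.map_snd_enumerate]
    exact bDups_nodup lst
  have := PySem.Dict.items_foldl_insert_fresh
      ((PySem.List.enumerate (bDups lst) 1).map (fun p => (p.2, p.1)))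
      Prod.fst Prod.snd PySem.Dict.empty (by simp [PySem.Dict.contains_empty]) hn
  simpa [bGroup, PySem.Dict.ofList, PySem.Dict.update, PySem.Dict.items] using this

lemma bGroup_keys (lst : List String) : (bGroup lst).keys = bDups lst := by
  simp only [PySem.Dict.keys, bGroup_items, List.map_map]
  have : (Prod.fst ∘ fun p : Int × String => (p.2, p.1)) = Prod.snd := rfl
  rw [this, PySem.List.map_snd_enumerate]

lemma bGroup_contains (lst : List String) (w : String) :
    (bGroup lst).contains w = decide (w ∈ bDups lst) := by
  rw [PySem.Dict.contains_eq_decide_mem_keys, bGroup_keys]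

lemma bGroup_getD (lst : List String) {l₁ l₂ : List String} {w : String}
    (h : bDups lst = l₁ ++ w :: l₂) :
    (bGroup lst).getD w 0 = (l₁.length : Int) + 1 := by
  have hmem : (w, (l₁.length : Int) + 1) ∈ (bGroup lst).items := by
    rw [bGroup_items, h, PySem.List.enumerate_append, PySem.List.enumerate_cons]
    simp [add_comm]
  have hnd : (bGroup lst).keys.Nodup := by rw [bGroup_keys]; exact bDups_nodup lst
  exact PySem.Dict.getD_of_mem_items _ hmem hnd 0

lemma mem_pvDD (lst p : List String) (v : String) :
    v ∈ pvDD lst p ↔ v ∈ p ∧ 1 < List.count v lst := by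
  simp [pvDD, List.mem_filter, PySem.List.count_eq]

lemma mem_bDups (lst : List String) (v : String) :
    v ∈ bDups lst ↔ v ∈ lst ∧ 1 < List.count v lst :=
  mem_pvDD lst lst v

lemma pvGM_keys (lst p : List String) : (pvGM lst p).keys = pvDD lst p := by
  simp [pvGM, PySem.Dict.keys, List.map_map]
  exact List.map_id _

lemma pvGC_keys (lst p : List String) : (pvGC lst p).keys = pvDD lst p := by
  simp [pvGC, PySem.Dict.keys, List.map_map]
  exact List.map_id _

lemma pvGM_getD (lst p : List String) {v : String} (hv : v ∈ pvDD lst p) :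
    (pvGM lst p).getD v "" = "DUPLICATED " ++ PySem.Int.toStr ((bGroup lst).getD v 0) := by
  refine PySem.Dict.getD_of_mem_items _ ?_ ?_ _
  · exact List.mem_map.mpr ⟨v, hv, rfl⟩
  · rw [pvGM_keys]; exact nodup_pvDD lst p

lemma pvGC_getD (lst p : List String) {v : String} (hv : v ∈ pvDD lst p) :
    (pvGC lst p).getD v 0 = (List.count v p : Int) := by
  refine PySem.Dict.getD_of_mem_items _ ?_ ?_ _
  · exact List.mem_map.mpr ⟨v, hv, by simp [PySem.List.count_eq]⟩
  · rw [pvGC_keys]; exact nodup_pvDD lst p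

lemma pvGM_contains (lst p : List String) (v : String) :
    (pvGM lst p).contains v = decide (v ∈ pvDD lst p) := by
  rw [PySem.Dict.contains_eq_decide_mem_keys, pvGM_keys]

lemma pvGC_contains (lst p : List String) (v : String) :
    (pvGC lst p).contains v = decide (v ∈ pvDD lst p) := by
  rw [PySem.Dict.contains_eq_decide_mem_keys, pvGC_keys]

lemma pvDD_append_stale (lst p : List String) {w : String}
    (h : w ∈ p ∨ ¬ 1 < List.count w lst) : pvDD lst (p ++ [w]) = pvDD lst p := by
  unfold pvDD
  rw [dedup_append_singleton]
  rcases h with h | h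
  · rw [if_pos ((PySem.List.mem_dedup p w).mpr h)]
  · split
    · rfl
    · rw [List.filter_append]
      simp [PySem.List.count_eq, h]

lemma pvDD_append_fresh (lst p : List String) {w : String}
    (hw : w ∉ p) (hc : 1 < List.count w lst) : pvDD lst (p ++ [w]) = pvDD lst p ++ [w] := by
  unfold pvDD
  rw [dedup_append_singleton, if_neg (fun hm => hw ((PySem.List.mem_dedup p w).mp hm)),
    List.filter_append]
  simp [PySem.List.count_eq, hc]

lemma pvOut_append (lst p : List String) (w : String) :
    pvOut lst (p ++ [w]) = pvOut lst p ++ [bLabel lst (bGroup lst) (p.length : Int) w] := by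
  simp [pvOut, PySem.List.enumerate_append, PySem.List.enumerate_cons]

lemma bLabel_step (lst p suf : List String) (w : String) (h : lst = p ++ w :: suf) :
    bLabel lst (bGroup lst) (p.length : Int) w =
      if 1 < List.count w lst then
        (if List.count w p = 0 then "DUPLICATED " ++ PySem.Int.toStr ((bGroup lst).getD w 0)
         else "DUPLICATED " ++ PySem.Int.toStr ((bGroup lst).getD w 0) ++ " ("
              ++ PySem.Int.toStr ((List.count w p : Nat) : Int) ++ ")")
      else "NOT DUPLICATED" := by
  have hw : w ∈ lst := by subst h; simp
  have hsl : PySem.List.slice lst none (some (p.length : Int)) = p := by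
    rw [PySem.List.slice_to_natCast]; subst h; exact List.take_left
  unfold bLabel
  rw [bGroup_contains, hsl, PySem.List.count_eq]
  by_cases hc : 1 < List.count w lst
  · have hm : w ∈ bDups lst := (mem_bDups lst w).mpr ⟨hw, hc⟩
    simp [hm, hc]
  · have hm : w ∉ bDups lst := fun hm => hc ((mem_bDups lst w).mp hm).2
    simp [hm, hc]

lemma one_step (lst p suf : List String) (w : String) (h : lst = p ++ w :: suf) :
    aStep (countsOf lst) (pvGM lst p, pvGC lst p, pvOut lst p) w
      = (pvGM lst (p ++ [w]), pvGC lst (p ++ [w]), pvOut lst (p ++ [w])) := by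
  have hw : w ∈ lst := by subst h; simp
  unfold aStep
  rw [countsOf_getD, pvOut_append, bLabel_step lst p suf w h]
  by_cases hc : 1 < List.count w lst
  · have hcast : (1 : Int) < ((lst.count w : Nat) : Int) := by exact_mod_cast hc
    rw [if_pos hcast, if_pos hc]
    by_cases hwp : w ∈ p
    · have hmem : w ∈ pvDD lst p := (mem_pvDD lst p w).mpr ⟨hwp, hc⟩
      have hcont : (pvGM lst p).contains w = true := by
        rw [pvGM_contains]; exact decide_eq_true hmem
      simp only [hcont, if_pos]
      have hcontC : (pvGC lst p).contains w = true := by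
        rw [pvGC_contains]; exact decide_eq_true hmem
      rw [pvGC_getD lst p hmem, PySem.Dict.getD_insert_self]
      have hcp : 0 < List.count w p := List.count_pos_iff.mpr hwp
      have hne1 : ¬ ((List.count w p : Int) + 1 = 1) := by omega
      have hne0 : ¬ (List.count w p = 0) := by omega
      rw [if_neg hne1, if_neg hne0]
      have hdd := pvDD_append_stale lst p (Or.inl hwp)
      simp only [Prod.mk.injEq]
      refine ⟨?_, ?_, ?_⟩
      · simp [pvGM, hdd]
      · apply PySem.Dict.ext
        rw [PySem.Dict.items_insert_of_contains _ _ hcontC]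
        simp only [pvGC, hdd, List.map_map]
        apply List.map_congr_left
        intro v hv
        by_cases hvw : v = w
        · subst hvw
          simp [PySem.List.count_eq, List.count_append]
        · have : ¬ (v == w) = true := by simp [hvw]
          simp only [Function.comp_apply, this]
          have hnwv : ¬ w = v := fun he => hvw he.symm
          simp [PySem.List.count_eq, List.count_append, hnwv]
      · rw [pvGM_getD lst p hmem]
        have hsub : ((List.count w p : Int) + 1 - 1) = ((List.count w p : Nat) : Int) := by ring
        rw [hsub]
    · have hnmem : w ∉ pvDD lst p := fun hm => hwp ((mem_pvDD lst p w).mp hm).1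
      have hcont : (pvGM lst p).contains w = false := by
        rw [pvGM_contains]; exact decide_eq_false hnmem
      have hcontC : (pvGC lst p).contains w = false := by
        rw [pvGC_contains]; exact decide_eq_false hnmem
      simp only [hcont, Bool.false_eq_true, if_false]
      rw [PySem.Dict.getD_insert_self, PySem.Dict.insert_insert_self,
        PySem.Dict.getD_insert_self]
      rw [if_pos (by norm_num : (0 : Int) + 1 = 1)]
      have hdd := pvDD_append_fresh lst p hwp hc
      obtain ⟨t, ht⟩ := pvDD_prefix lst (⟨suf, by simp [h]⟩ : p ++ [w] <+: lst)
      rw [hdd] at ht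
      have hb : bDups lst = pvDD lst p ++ w :: t := by rw [← ht]; simp
      have hg : (bGroup lst).getD w 0 = ((pvDD lst p).length : Int) + 1 := bGroup_getD lst hb
      have hsize : (((pvGM lst p).size : Nat) : Int) = ((pvDD lst p).length : Int) := by
        simp [pvGM, PySem.Dict.size]
      have hcnt0 : List.count w p = 0 := List.count_eq_zero.mpr hwp
      rw [PySem.Dict.getD_insert_self, hsize, ← hg]
      simp only [Prod.mk.injEq]
      refine ⟨?_, ?_, ?_⟩
      · apply PySem.Dict.ext
        rw [PySem.Dict.items_insert_of_not_contains _ _ hcont]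
        simp [pvGM, hdd, hg]
      · apply PySem.Dict.ext
        rw [PySem.Dict.items_insert_of_not_contains _ _ hcontC]
        simp only [pvGC, hdd, List.map_append, List.map_cons, List.map_nil]
        congr 1
        · apply List.map_congr_left
          intro v hv
          have hvp : v ∈ p := ((mem_pvDD lst p v).mp hv).1
          have hnwv : ¬ w = v := fun he => hwp (he ▸ hvp)
          simp [PySem.List.count_eq, List.count_append, hnwv]
        · simp [PySem.List.count_eq, List.count_append, hcnt0]
      · rw [if_pos hcnt0]
  · have hcast : ¬ (1 : Int) < ((lst.count w : Nat) : Int) := by exact_mod_cast hc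
    rw [if_neg hcast, if_neg hc]
    have hdd := pvDD_append_stale lst p (Or.inr hc)
    simp only [Prod.mk.injEq]
    refine ⟨?_, ?_, trivial⟩
    · simp [pvGM, hdd]
    · apply PySem.Dict.ext
      simp only [pvGC, hdd]
      apply List.map_congr_left
      intro v hv
      have hne : ¬ w = v := fun he => hc (he ▸ ((mem_pvDD lst p v).mp hv).2)
      simp [PySem.List.count_eq, List.count_append, hne]

lemma loopA (lst : List String) (suf p : List String) (h : lst = p ++ suf) :
    suf.foldl (aStep (countsOf lst)) (pvGM lst p, pvGC lst p, pvOut lst p)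
      = (pvGM lst lst, pvGC lst lst, pvOut lst lst) := by
  induction suf generalizing p with
  | nil => simp at h; subst h; rfl
  | cons w rest ih =>
      rw [List.foldl_cons, one_step lst p rest w h]
      exact ih (p ++ [w]) (by simpa using h)

-- ===== VERDICT (by name: the statement is the Claim_ definition above) =====
theorem duplicate_tracker_spec : Claim_equal_duplicate_tracker := by
  intro lst _
  unfold Spec_duplicate_tracker duplicate_tracker duplicate_tracker_alt
  have h0 : (PySem.Dict.empty, PySem.Dict.empty, ([] : List String))
      = (pvGM lst [], pvGC lst [], pvOut lst []) := rfl
  rw [h0, loopA lst lst [] (by simp)]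
  rfl
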